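-- pv_equiv track=rewrite | github.com/Green0v0/TIL | Playdata/4_Month/모의고사1.py | solution
-- ===== SOURCE A (Python) =====
-- def solution(apparentGanin):
-- # 몸무게의 제곱을 보여주는 체중계
-- # apparentGain (제인 현재 몸무게의 제곱과 예전 몸무게의 제곱의 차이)
-- # 가장 최근의 측정 이후 가능한 제인의 실제 몸무게를 오름차순으로 정렬한 정수값의 배열을 리턴하시오.
-- #     n = (apparentGanin + 1) // 2
-- #     result = []
-- #     for i in range(1, n + 1):
-- #         for j in range(1,i + 1):
-- #             if i**2 - j**2 == apparentGanin:
-- #                 result.append(i)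
-- #     return result
--
-- # 투포인터
--     n = (apparentGanin + 1) // 2
--     weight = list(range(1,n+1))
--     result = []
--     # idx
--     l, r = 0, 1
--     while r < n:
--         curr = weight[r]**2 - weight[l]**2
--         if r <= l:
--             break
--         if curr < apparentGanin:
--             r += 1
--         elif curr > apparentGanin:
--             l += 1
--         elif curr == apparentGanin:
--             result.append(weight[r])
--             l += 1
--
--     return result
-- ===== SOURCE B (Python) =====
-- def solution(apparentGanin):
--     # Enumerate divisor pairs d*e = apparentGanin with d < sqrt(g); i = (d+e)/2 when d+e even.
--     result = []
--     d = 1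
--     while d * d < apparentGanin:
--         if apparentGanin % d == 0:
--             e = apparentGanin // d
--             if (d + e) % 2 == 0:
--                 result.append((d + e) // 2)
--         d += 1
--     result.reverse()
--     return result
-- ===== Notes on version B (the rewrite author's own statement) =====
-- stated objective: faster
-- what changed: Replaces the O(g) two-pointer sweep over all candidate weights 1..(g+1)//2 by an O(sqrt(g)) enumeration of divisor pairs d*e = g, emitting i = (d+e)//2 whenever d < sqrt(g) and d+e is even, then reversing to ascending order.
import Mathlib
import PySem

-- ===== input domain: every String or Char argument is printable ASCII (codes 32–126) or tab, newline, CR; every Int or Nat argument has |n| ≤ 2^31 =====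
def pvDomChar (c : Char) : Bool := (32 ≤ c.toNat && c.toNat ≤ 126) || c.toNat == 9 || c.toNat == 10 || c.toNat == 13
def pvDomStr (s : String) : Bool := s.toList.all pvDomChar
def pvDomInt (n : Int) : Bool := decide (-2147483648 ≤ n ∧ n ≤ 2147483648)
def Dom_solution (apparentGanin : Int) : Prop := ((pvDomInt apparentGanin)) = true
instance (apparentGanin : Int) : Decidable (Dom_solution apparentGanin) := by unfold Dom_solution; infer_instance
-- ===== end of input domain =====

-- B replaces A's O(g) two-pointer sweep over the weights 1..(g+1)//2 by an O(sqrt(g))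
-- enumeration of divisor pairs d*e = g (i = (d+e)//2 when d+e is even), reversed to ascending.

-- ===== PORT A =====
-- while r < n: curr = weight[r]**2 - weight[l]**2; break if r <= l; advance l/r, append weight[r] on hit.
-- The final `else` branch is Python's `elif curr == apparentGanin` (forced by trichotomy).
def loopA (g n : Int) (weight : List Int) (l r : Int) (acc : List Int) : List Int :=
  if _hr : r < n then
    match PySem.List.pyGet? weight r, PySem.List.pyGet? weight l with
    | some wr, some wl =>
      let curr := wr ^ 2 - wl ^ 2
      if _hb : r ≤ l then acc
      else if curr < g then loopA g n weight l (r + 1) acc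
      else if g < curr then loopA g n weight (l + 1) r acc
      else loopA g n weight (l + 1) r (acc ++ [wr])
    | _, _ => acc  -- unreachable: 0 ≤ l ≤ r < n = len(weight), so indexing never raises
  else acc
termination_by (2 * n - l - r).toNat
decreasing_by all_goals omega

def solution (apparentGanin : Int) : List Int :=
  let n := PySem.Int.floordiv (apparentGanin + 1) 2
  let weight := PySem.List.pyRange 1 (n + 1) 1
  loopA apparentGanin n weight 0 1 []

-- ===== PORT B =====
-- while d*d < g: if g % d == 0 and (d + g//d) % 2 == 0: append (d + g//d)//2; d += 1; reverse.
def loopB (g d : Int) (acc : List Int) : List Int :=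
  if _h : d * d < g then
    if PySem.Int.mod g d = 0 then
      if PySem.Int.mod (d + PySem.Int.floordiv g d) 2 = 0 then
        loopB g (d + 1) (acc ++ [PySem.Int.floordiv (d + PySem.Int.floordiv g d) 2])
      else loopB g (d + 1) acc
    else loopB g (d + 1) acc
  else acc
termination_by (g - d).toNat
decreasing_by all_goals
  (have hdd : 0 ≤ d * d := mul_self_nonneg d
   have h2 : d ≤ d * d ∨ d ≤ 0 := by
     by_cases h1 : 1 ≤ d
     · exact Or.inl (le_mul_of_one_le_left (by omega) h1)
     · exact Or.inr (by omega)
   omega)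

def solution_alt (apparentGanin : Int) : List Int :=
  (loopB apparentGanin 1 []).reverse

-- ===== PRECONDITION & SPEC =====
def Spec_solution (apparentGanin : Int) (out : List Int) : Prop := out = solution_alt apparentGanin
instance (apparentGanin : Int) (out : List Int) : Decidable (Spec_solution apparentGanin out) := by unfold Spec_solution; infer_instance

-- ===== CLAIM (what is proved, stated in full; the proofs are below) =====
def Claim_equal_solution : Prop := ∀ (apparentGanin : Int), Dom_solution apparentGanin → Spec_solution apparentGanin (solution apparentGanin)

-- ===== LEMMAS AND PROOFS =====

-- the common specification: i is a possible weight iff i*i - j*j = g for some 1 ≤ j < i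
def QSol (g i : Int) : Prop := ∃ j : Int, 1 ≤ j ∧ j < i ∧ i * i - j * j = g

lemma sqInj (a b : Int) (ha : 0 ≤ a) (hb : 0 ≤ b) (h : a * a = b * b) : a = b := by
  rcases lt_trichotomy a b with hlt | he | hgt
  · nlinarith
  · exact he
  · nlinarith

-- unfolding lemmas for loopA
lemma loopA_stop (g n : Int) (weight : List Int) (l r : Int) (acc : List Int)
    (h : ¬ r < n) : loopA g n weight l r acc = acc := by
  rw [loopA, dif_neg h]

lemma loopA_eq (g n : Int) (weight : List Int) (l r : Int) (acc : List Int)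
    (hr : r < n) (wr wl : Int)
    (hwr : PySem.List.pyGet? weight r = some wr)
    (hwl : PySem.List.pyGet? weight l = some wl) :
    loopA g n weight l r acc =
      if r ≤ l then acc
      else if wr ^ 2 - wl ^ 2 < g then loopA g n weight l (r + 1) acc
      else if g < wr ^ 2 - wl ^ 2 then loopA g n weight (l + 1) r acc
      else loopA g n weight (l + 1) r (acc ++ [wr]) := by
  rw [loopA, dif_pos hr, hwr, hwl]
  rfl

-- exit of the two-pointer loop with r ≥ n: acc already holds every solution
lemma loopA_exit (g n l r : Int) (acc : List Int) (hgn : g ≤ 2 * n) (hnr : n ≤ r)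
    (_hlr : l ≤ r)
    (hacc : ∀ i : Int, i ∈ acc ↔ (QSol g i ∧ (i ≤ r ∨ (i = r + 1 ∧
      ∃ b : Int, 1 ≤ b ∧ b ≤ l ∧ (r + 1) * (r + 1) - b * b = g)))) :
    ∀ i : Int, i ∈ acc ↔ QSol g i := by
  intro i
  rw [hacc i]
  constructor
  · exact fun h => h.1
  · intro hq
    refine ⟨hq, Or.inl ?_⟩
    obtain ⟨j, hj1, hji, he⟩ := hq
    have hjj : j * j ≤ (i - 1) * (i - 1) := mul_self_le_mul_self (by omega) (by omega)
    nlinarith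

-- main invariant of A's two-pointer loop
lemma loopA_inv (g n : Int) (weight : List Int)
    (hw : ∀ k : Int, 0 ≤ k → k < n → PySem.List.pyGet? weight k = some (k + 1))
    (hgn : g ≤ 2 * n) :
    ∀ (N : Nat) (l r : Int) (acc : List Int),
      (2 * n - l - r).toNat ≤ N →
      0 ≤ l → l ≤ r → 1 ≤ r →
      (∀ b : Int, 1 ≤ b → b ≤ l → g ≤ (r + 1) * (r + 1) - b * b) →
      (∀ b : Int, 1 ≤ b → b ≤ l → (r + 1) * (r + 1) - b * b = g → (r + 1) ∈ acc) →
      (∀ i : Int, i ∈ acc ↔ (QSol g i ∧ (i ≤ r ∨ (i = r + 1 ∧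
        ∃ b : Int, 1 ≤ b ∧ b ≤ l ∧ (r + 1) * (r + 1) - b * b = g)))) →
      acc.Pairwise (· < ·) →
      (loopA g n weight l r acc).Pairwise (· < ·) ∧
      (∀ i : Int, i ∈ loopA g n weight l r acc ↔ QSol g i) := by
  intro N
  induction N with
  | zero =>
    intro l r acc hN h0l hlr h1r hb hb2 hacc hpw
    by_cases hr : r < n
    · exfalso; omega
    · rw [loopA_stop _ _ _ _ _ _ hr]
      exact ⟨hpw, loopA_exit g n l r acc hgn (by omega) hlr hacc⟩
  | succ N ih =>
    intro l r acc hN h0l hlr h1r hb hb2 hacc hpw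
    by_cases hr : r < n
    · rw [loopA_eq g n weight l r acc hr (r + 1) (l + 1)
        (hw r (by omega) hr) (hw l h0l (by omega))]
      by_cases hrl : r ≤ l
      · rw [if_pos hrl]
        refine ⟨hpw, ?_⟩
        intro i
        rw [hacc i]
        constructor
        · exact And.left
        · intro hq
          refine ⟨hq, ?_⟩
          obtain ⟨j, hj1, hji, he⟩ := hq
          have hglb : g ≤ (r + 1) * (r + 1) - r * r := hb r (by omega) (by omega)
          have hjj : j * j ≤ (i - 1) * (i - 1) := mul_self_le_mul_self (by omega) (by omega)
          have hir : i ≤ r + 1 := by nlinarith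
          by_cases hi : i ≤ r
          · exact Or.inl hi
          · have hieq : i = r + 1 := by omega
            subst hieq
            exact Or.inr ⟨rfl, j, hj1, by omega, he⟩
      · rw [if_neg hrl]
        have hlr2 : l < r := by omega
        have hcur : ((r : Int) + 1) ^ 2 - (l + 1) ^ 2 = (r + 1) * (r + 1) - (l + 1) * (l + 1) := by
          ring
        by_cases hclt : ((r : Int) + 1) ^ 2 - (l + 1) ^ 2 < g
        · -- curr < g : advance r
          rw [if_pos hclt]
          rw [hcur] at hclt
          apply ih l (r + 1) acc (by omega) h0l (by omega) (by omega)
          · intro b h1 h2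
            have := hb b h1 h2
            nlinarith
          · intro b h1 h2 hbe
            exfalso
            have := hb b h1 h2
            nlinarith
          · intro i
            rw [hacc i]
            constructor
            · rintro ⟨hq, hc⟩
              refine ⟨hq, Or.inl ?_⟩
              rcases hc with h | ⟨h, -⟩ <;> omega
            · rintro ⟨hq, hc⟩
              rcases hc with hile | ⟨hieq, b, hb1, hbl, hbe⟩
              · by_cases hir : i ≤ r
                · exact ⟨hq, Or.inl hir⟩
                · have hieq : i = r + 1 := by omega
                  subst hieq
                  obtain ⟨j, hj1, hji, hje⟩ := hq
                  by_cases hjl : j ≤ l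
                  · exact ⟨⟨j, hj1, hji, hje⟩, Or.inr ⟨rfl, j, hj1, hjl, hje⟩⟩
                  · exfalso
                    have hjj : (l + 1) * (l + 1) ≤ j * j :=
                      mul_self_le_mul_self (by omega) (by omega)
                    nlinarith
              · exfalso
                have := hb b hb1 hbl
                nlinarith
          · exact hpw
        · rw [if_neg hclt]
          rw [hcur] at hclt
          by_cases hcgt : g < ((r : Int) + 1) ^ 2 - (l + 1) ^ 2
          · -- curr > g : advance l
            rw [if_pos hcgt]
            rw [hcur] at hcgt
            apply ih (l + 1) r acc (by omega) (by omega) (by omega) h1r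
            · intro b h1 h2
              by_cases hbl : b ≤ l
              · exact hb b h1 hbl
              · have hbe : b = l + 1 := by omega
                subst hbe
                linarith
            · intro b h1 h2 hbe
              by_cases hbl : b ≤ l
              · exact hb2 b h1 hbl hbe
              · exfalso
                have : b = l + 1 := by omega
                subst this
                linarith
            · intro i
              rw [hacc i]
              constructor
              · rintro ⟨hq, hc⟩
                refine ⟨hq, ?_⟩
                rcases hc with h | ⟨he, b, h1, h2, h3⟩
                · exact Or.inl h
                · exact Or.inr ⟨he, b, h1, by omega, h3⟩
              · rintro ⟨hq, hc⟩
                refine ⟨hq, ?_⟩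
                rcases hc with h | ⟨he, b, h1, h2, h3⟩
                · exact Or.inl h
                · by_cases hbl : b ≤ l
                  · exact Or.inr ⟨he, b, h1, hbl, h3⟩
                  · exfalso
                    have : b = l + 1 := by omega
                    subst this
                    linarith
            · exact hpw
          · -- curr = g : append weight[r] and advance l
            rw [if_neg hcgt]
            rw [hcur] at hcgt
            have hceq : (r + 1) * (r + 1) - (l + 1) * (l + 1) = g := by
              have h1 := not_lt.mp hclt
              have h2 := not_lt.mp hcgt
              linarith
            have hnotmem : (r + 1) ∉ acc := by
              intro hmem
              obtain ⟨-, hc⟩ := (hacc _).mp hmem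
              rcases hc with h | ⟨-, b, hb1, hbl, hbe⟩
              · omega
              · have hbb : b * b = (l + 1) * (l + 1) := by linarith
                have := sqInj b (l + 1) (by omega) (by omega) hbb
                omega
            apply ih (l + 1) r (acc ++ [r + 1]) (by omega) (by omega) (by omega) h1r
            · intro b h1 h2
              by_cases hbl : b ≤ l
              · exact hb b h1 hbl
              · have : b = l + 1 := by omega
                subst this
                linarith
            · intro b h1 h2 hbe
              exact List.mem_append_right _ (by simp)
            · intro i
              rw [List.mem_append, hacc i]
              constructor
              · rintro (⟨hq, hc⟩ | hi1)
                · refine ⟨hq, ?_⟩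
                  rcases hc with h | ⟨he, b, h1, h2, h3⟩
                  · exact Or.inl h
                  · exact Or.inr ⟨he, b, h1, by omega, h3⟩
                · have hieq : i = r + 1 := by simpa using hi1
                  subst hieq
                  refine ⟨⟨l + 1, by omega, by omega, hceq⟩,
                    Or.inr ⟨rfl, l + 1, by omega, le_refl _, hceq⟩⟩
              · rintro ⟨hq, hc⟩
                rcases hc with h | ⟨he, b, h1, h2, h3⟩
                · exact Or.inl ⟨hq, Or.inl h⟩
                · by_cases hbl : b ≤ l
                  · exact Or.inl ⟨hq, Or.inr ⟨he, b, h1, hbl, h3⟩⟩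
                  · exact Or.inr (by simp [he])
            · refine List.pairwise_append.mpr ⟨hpw, List.pairwise_singleton _ _, ?_⟩
              intro x hx y hy
              have hy' : y = r + 1 := by simpa using hy
              subst hy'
              rcases ((hacc x).mp hx).2 with h | ⟨hxe, -⟩
              · omega
              · exact absurd (hxe ▸ hx) hnotmem
    · rw [loopA_stop _ _ _ _ _ _ hr]
      exact ⟨hpw, loopA_exit g n l r acc hgn (by omega) hlr hacc⟩

-- B-side: divisor condition and emitted value
def CDiv (g d : Int) : Prop := 1 ≤ d ∧ d * d < g ∧ d ∣ g ∧ (2 ∣ (d + g / d))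

def ival (g d : Int) : Int := (d + g / d) / 2

-- emitted values strictly decrease as d grows
lemma ival_lt (g a b : Int) (ha : CDiv g a) (hb : CDiv g b) (hab : a < b) :
    ival g b < ival g a := by
  obtain ⟨ha1, ha2, hadvd, hapar⟩ := ha
  obtain ⟨hb1, hb2, hbdvd, hbpar⟩ := hb
  obtain ⟨ea, hea⟩ := hadvd
  obtain ⟨eb, heb⟩ := hbdvd
  have hgda : g / a = ea := by rw [hea]; exact Int.mul_ediv_cancel_left ea (by omega)
  have hgdb : g / b = eb := by rw [heb]; exact Int.mul_ediv_cancel_left eb (by omega)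
  have hbeb : b < eb := by nlinarith
  have haeb : a < eb := by omega
  have h4 : (b - a) * a < (b - a) * eb := mul_lt_mul_of_pos_left haeb (by omega)
  have h5 : a * (ea - eb) = (b - a) * eb := by linear_combination heb - hea
  have h6 : a * (b - a) < a * (ea - eb) := by rw [h5]; linarith [h4, mul_comm (b - a) a]
  have h7 : b - a < ea - eb := lt_of_mul_lt_mul_left h6 (by omega)
  rw [hgda] at hapar
  rw [hgdb] at hbpar
  obtain ⟨ka, hka⟩ := hapar
  obtain ⟨kb, hkb⟩ := hbpar
  have hia : ival g a = ka := by
    unfold ival; rw [hgda, hka]; exact Int.mul_ediv_cancel_left ka (by norm_num)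
  have hib : ival g b = kb := by
    unfold ival; rw [hgdb, hkb]; exact Int.mul_ediv_cancel_left kb (by norm_num)
  rw [hia, hib]; omega

-- divisor pairs are exactly the solutions
lemma CDiv_iff_QSol (g i : Int) :
    (∃ d : Int, CDiv g d ∧ i = ival g d) ↔ QSol g i := by
  constructor
  · rintro ⟨d, ⟨hd1, hdd, hdvd, hpar⟩, hi⟩
    obtain ⟨e, he⟩ := hdvd
    have hgd : g / d = e := by rw [he]; exact Int.mul_ediv_cancel_left e (by omega)
    rw [hgd] at hpar
    obtain ⟨k, hk⟩ := hpar
    have hde : d < e := by nlinarith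
    have hik : i = k := by
      rw [hi]; unfold ival; rw [hgd, hk]; exact Int.mul_ediv_cancel_left k (by norm_num)
    subst hik
    refine ⟨i - d, by omega, by omega, ?_⟩
    have he2 : e = 2 * i - d := by omega
    rw [he, he2]; ring
  · rintro ⟨j, hj1, hji, he⟩
    have hprod : (i - j) * (i + j) = g := by linear_combination he
    have hdvd : (i - j) ∣ g := ⟨i + j, hprod.symm⟩
    have hgd : g / (i - j) = i + j := by
      rw [← hprod]; exact Int.mul_ediv_cancel_left _ (by omega)
    refine ⟨i - j, ⟨by omega, by nlinarith, hdvd, ?_⟩, ?_⟩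
    · rw [hgd]; exact ⟨i, by ring⟩
    · unfold ival
      rw [hgd]
      have h2 : i - j + (i + j) = 2 * i := by ring
      rw [h2, Int.mul_ediv_cancel_left i (by norm_num)]

-- main invariant of B's divisor loop
lemma loopB_exit (g d : Int) (acc : List Int) (hstop : ¬ d * d < g) (hd1 : 1 ≤ d)
    (hacc : ∀ i : Int, i ∈ acc ↔ ∃ d' : Int, d' < d ∧ CDiv g d' ∧ i = ival g d') :
    ∀ i : Int, i ∈ acc ↔ ∃ d' : Int, CDiv g d' ∧ i = ival g d' := by
  intro i
  rw [hacc i]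
  constructor
  · rintro ⟨d', _, hc, hi⟩; exact ⟨d', hc, hi⟩
  · rintro ⟨d', hc, hi⟩
    refine ⟨d', ?_, hc, hi⟩
    by_contra hge
    have hge' : d ≤ d' := by omega
    have hsq : d * d ≤ d' * d' := mul_self_le_mul_self (by omega) hge'
    have := hc.2.1
    omega

lemma loopB_inv (g : Int) :
    ∀ (N : Nat) (d : Int) (acc : List Int),
      (g - d).toNat ≤ N → 1 ≤ d →
      (∀ i : Int, i ∈ acc ↔ ∃ d' : Int, d' < d ∧ CDiv g d' ∧ i = ival g d') →
      acc.Pairwise (· > ·) →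
      (loopB g d acc).Pairwise (· > ·) ∧
      (∀ i : Int, i ∈ loopB g d acc ↔ ∃ d' : Int, CDiv g d' ∧ i = ival g d') := by
  intro N
  induction N with
  | zero =>
    intro d acc hN hd1 hacc hpw
    by_cases h : d * d < g
    · exfalso
      have hdd : d ≤ d * d := le_mul_of_one_le_left (by omega) hd1
      omega
    · rw [loopB, dif_neg h]
      exact ⟨hpw, loopB_exit g d acc h hd1 hacc⟩
  | succ N ih =>
    intro d acc hN hd1 hacc hpw
    by_cases h : d * d < g
    · rw [loopB, dif_pos h]
      have hdd : d ≤ d * d := le_mul_of_one_le_left (by omega) hd1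
      have hNm : (g - (d + 1)).toNat ≤ N := by omega
      by_cases h1 : PySem.Int.mod g d = 0
      · have hdvd : d ∣ g := (PySem.Int.mod_eq_zero_iff_dvd g d).mp h1
        have hfd : PySem.Int.floordiv g d = g / d :=
          PySem.Int.floordiv_eq_ediv_of_pos (by omega)
        rw [if_pos h1, hfd]
        by_cases h2 : PySem.Int.mod (d + g / d) 2 = 0
        · rw [if_pos h2]
          have hpar : 2 ∣ (d + g / d) := (PySem.Int.mod_eq_zero_iff_dvd _ 2).mp h2
          have hCD : CDiv g d := ⟨hd1, h, hdvd, hpar⟩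
          have hfd2 : PySem.Int.floordiv (d + g / d) 2 = ival g d :=
            PySem.Int.floordiv_eq_ediv_of_pos (by norm_num)
          rw [hfd2]
          apply ih (d + 1) (acc ++ [ival g d]) hNm (by omega)
          · intro i
            rw [List.mem_append]
            constructor
            · rintro (hi | hi)
              · obtain ⟨d', hd', hc, hiv⟩ := (hacc i).mp hi
                exact ⟨d', by omega, hc, hiv⟩
              · have : i = ival g d := by simpa using hi
                exact ⟨d, by omega, hCD, this⟩
            · rintro ⟨d', hd', hc, hiv⟩
              by_cases hlt : d' < d
              · exact Or.inl ((hacc i).mpr ⟨d', hlt, hc, hiv⟩)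
              · have : d' = d := by omega
                subst this
                exact Or.inr (by simp [hiv])
          · refine List.pairwise_append.mpr ⟨hpw, List.pairwise_singleton _ _, ?_⟩
            intro x hx y hy
            have hy' : y = ival g d := by simpa using hy
            subst hy'
            obtain ⟨d', hd', hc, hiv⟩ := (hacc x).mp hx
            rw [hiv]
            exact ival_lt g d' d hc hCD hd'
        · rw [if_neg h2]
          apply ih (d + 1) acc hNm (by omega)
          · intro i
            rw [hacc i]
            constructor
            · rintro ⟨d', hd', hc, hiv⟩; exact ⟨d', by omega, hc, hiv⟩
            · rintro ⟨d', hd', hc, hiv⟩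
              by_cases hlt : d' < d
              · exact ⟨d', hlt, hc, hiv⟩
              · exfalso
                have : d' = d := by omega
                subst this
                obtain ⟨-, -, -, hpar⟩ := hc
                exact h2 ((PySem.Int.mod_eq_zero_iff_dvd _ 2).mpr hpar)
          · exact hpw
      · rw [if_neg h1]
        apply ih (d + 1) acc hNm (by omega)
        · intro i
          rw [hacc i]
          constructor
          · rintro ⟨d', hd', hc, hiv⟩; exact ⟨d', by omega, hc, hiv⟩
          · rintro ⟨d', hd', hc, hiv⟩
            by_cases hlt : d' < d
            · exact ⟨d', hlt, hc, hiv⟩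
            · exfalso
              have hde : d' = d := by omega
              have hdvd' := hc.2.2.1
              rw [hde] at hdvd'
              exact h1 ((PySem.Int.mod_eq_zero_iff_dvd g d).mpr hdvd')
        · exact hpw
    · rw [loopB, dif_neg h]
      exact ⟨hpw, loopB_exit g d acc h hd1 hacc⟩

lemma a_char (g : Int) :
    (solution g).Pairwise (· < ·) ∧ ∀ i : Int, i ∈ solution g ↔ QSol g i := by
  have hfd : PySem.Int.floordiv (g + 1) 2 = (g + 1) / 2 :=
    PySem.Int.floordiv_eq_ediv_of_pos (by norm_num)
  set n := PySem.Int.floordiv (g + 1) 2 with hn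
  have hgn : g ≤ 2 * n := by rw [hfd]; omega
  have hw : ∀ k : Int, 0 ≤ k → k < n →
      PySem.List.pyGet? (PySem.List.pyRange 1 (n + 1) 1) k = some (k + 1) := by
    intro k h0 hkn
    rw [PySem.List.pyGet?_of_nonneg _ h0]
    have hlen : (PySem.List.pyRange 1 (n + 1) 1).length = (n + 1 - 1).toNat :=
      PySem.List.length_pyRange_one _ _
    have hkl : k.toNat < (PySem.List.pyRange 1 (n + 1) 1).length := by
      rw [hlen]; omega
    rw [List.getElem?_eq_getElem hkl, PySem.List.getElem_pyRange_one]
    congr 1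
    omega
  have hinit : ∀ i : Int, i ∈ ([] : List Int) ↔ (QSol g i ∧ (i ≤ 1 ∨ (i = 1 + 1 ∧
      ∃ b : Int, 1 ≤ b ∧ b ≤ 0 ∧ (1 + 1) * (1 + 1) - b * b = g))) := by
    intro i
    constructor
    · intro hmem; cases hmem
    · rintro ⟨⟨j, hj1, hji, -⟩, hc⟩
      rcases hc with h | ⟨-, b, hb1, hb2, -⟩ <;> omega
  obtain ⟨hp, hm⟩ := loopA_inv g n (PySem.List.pyRange 1 (n + 1) 1) hw hgn
    (2 * n).toNat 0 1 [] (by omega) (by omega) (by omega) (by omega)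
    (fun b h1 h2 => absurd h2 (by omega))
    (fun b h1 h2 _ => absurd h2 (by omega))
    hinit List.Pairwise.nil
  have hsol : solution g = loopA g n (PySem.List.pyRange 1 (n + 1) 1) 0 1 [] := rfl
  rw [hsol]
  exact ⟨hp, hm⟩

lemma alt_char (g : Int) :
    (solution_alt g).Pairwise (· < ·) ∧ ∀ i : Int, i ∈ solution_alt g ↔ QSol g i := by
  have hinit : ∀ i : Int, i ∈ ([] : List Int) ↔
      ∃ d' : Int, d' < 1 ∧ CDiv g d' ∧ i = ival g d' := by
    intro i
    constructor
    · intro hmem; cases hmem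
    · rintro ⟨d', hd', ⟨hd1, -, -, -⟩, -⟩; omega
  obtain ⟨hp, hm⟩ := loopB_inv g (g - 1).toNat 1 [] (by omega) (by omega) hinit List.Pairwise.nil
  unfold solution_alt
  constructor
  · exact List.pairwise_reverse.mpr hp
  · intro i
    rw [List.mem_reverse, hm i, CDiv_iff_QSol]

-- ===== VERDICT (by name: the statement is the Claim_ definition above) =====
theorem solution_spec : Claim_equal_solution := by
  intro g _hdom
  unfold Spec_solution
  obtain ⟨pa, ma⟩ := a_char g
  obtain ⟨pb, mb⟩ := alt_char g
  have nodupA : (solution g).Nodup := pa.imp ne_of_lt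
  have nodupB : (solution_alt g).Nodup := pb.imp ne_of_lt
  have hperm : (solution g).Perm (solution_alt g) :=
    (List.perm_ext_iff_of_nodup nodupA nodupB).mpr (fun a => (ma a).trans (mb a).symm)
  exact hperm.eq_of_pairwise (fun a b _ _ h1 h2 => le_antisymm h1 h2) (pa.imp le_of_lt) (pb.imp le_of_lt)
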